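-- pv_equiv track=rewrite | github.com/magimetal/dw-port-experiment | engine/items_engine.py | _remove_inventory_item
-- ===== SOURCE A (Python) =====
-- def _remove_inventory_item(slots: tuple[int, int, int, int], item_code: int) -> tuple[tuple[int, int, int, int], bool]:
--     # SOURCE: Bank03.asm RemoveInvItem/CheckForInvItem @ LE04B-LE078 (low nibble checked first).
--     out = [value & 0xFF for value in slots]
--     code = item_code & 0x0F
--     for idx, value in enumerate(out):
--         low = value & 0x0F
--         if low == code:
--             out[idx] = value & 0xF0
--             return (out[0], out[1], out[2], out[3]), True
--
--         high = (value >> 4) & 0x0F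
--         if high == code:
--             out[idx] = value & 0x0F
--             return (out[0], out[1], out[2], out[3]), True
--     return (out[0], out[1], out[2], out[3]), False
-- ===== SOURCE B (Python) =====
-- def _remove_inventory_item(slots: tuple[int, int, int, int], item_code: int) -> tuple[tuple[int, int, int, int], bool]:
--     out = [value & 0xFF for value in slots]
--     code = item_code & 0x0F
--
--     def pos(i):
--         value = out[i]
--         if value & 0x0F == code:
--             return 2 * i
--         if (value >> 4) & 0x0F == code:
--             return 2 * i + 1
--         return 8
--
--     p = min(pos(i) for i in range(4))
--     if p < 8:
--         out[p // 2] &= 0xF0 if p % 2 == 0 else 0x0F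
--     return (out[0], out[1], out[2], out[3]), p < 8
-- ===== Notes on version B (the rewrite author's own statement) =====
-- stated objective: alternative
-- what changed: B replaces A's sequential early-exit loop with a total argmin reduction: each slot is mapped to a numeric first-match position (2*i for low nibble, 2*i+1 for high, 8 for none), min() picks the winner, and the slot and clearing mask are decoded arithmetically from that position.
import Mathlib
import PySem

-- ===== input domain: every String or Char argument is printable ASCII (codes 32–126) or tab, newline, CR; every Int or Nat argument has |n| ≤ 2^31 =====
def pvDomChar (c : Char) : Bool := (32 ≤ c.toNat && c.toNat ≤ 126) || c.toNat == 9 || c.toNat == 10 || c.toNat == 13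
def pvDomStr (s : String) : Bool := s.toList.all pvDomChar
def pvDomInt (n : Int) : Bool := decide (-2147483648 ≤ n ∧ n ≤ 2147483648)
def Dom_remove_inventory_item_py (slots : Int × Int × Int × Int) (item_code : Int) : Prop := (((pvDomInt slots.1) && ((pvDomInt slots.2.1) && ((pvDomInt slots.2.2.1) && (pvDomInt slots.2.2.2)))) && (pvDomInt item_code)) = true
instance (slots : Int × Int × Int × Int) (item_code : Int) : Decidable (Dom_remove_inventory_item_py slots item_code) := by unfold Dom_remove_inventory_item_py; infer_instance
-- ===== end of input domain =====

-- B replaces A's sequential early-exit loop with a total argmin reduction over per-slot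
-- first-match positions, decoding slot and mask arithmetically (objective: alternative).

-- ===== PORT A =====
-- A's `for idx, value in enumerate(out)` loop with early returns; mutation happens only at the
-- returning step, so the recursion carries the untouched `out`, the running index and the rest.
def pvALoop (code : Int) (out : List Int) (idx : Nat) (rest : List Int) : List Int × Bool :=
  match rest with
  | [] => (out, false)
  | value :: rest' =>
    let low := PySem.Int.band value 0x0F
    if low = code then (out.set idx (PySem.Int.band value 0xF0), true)
    else
      let high := PySem.Int.band (value >>> 4) 0x0F
      if high = code then (out.set idx (PySem.Int.band value 0x0F), true)
      else pvALoop code out (idx + 1) rest'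

def remove_inventory_item_py (slots : Int × Int × Int × Int) (item_code : Int) : (Int × Int × Int × Int) × Bool :=
  let out := [slots.1, slots.2.1, slots.2.2.1, slots.2.2.2].map (fun v => PySem.Int.band v 0xFF)
  let code := PySem.Int.band item_code 0x0F
  let r := pvALoop code out 0 out
  ((r.1.getD 0 0, r.1.getD 1 0, r.1.getD 2 0, r.1.getD 3 0), r.2)

-- ===== PORT B =====
-- B's per-slot first-match position: 2*i if the low nibble matches, 2*i+1 if the high one does,
-- 8 (the sentinel: past all 8 nibbles) otherwise.  Positions are Nats, matching Python's
-- nonnegative ints here, so / and % agree with Python's // and %.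
def pvBPos (out : List Int) (code : Int) (i : Nat) : Nat :=
  let value := out.getD i 0
  if PySem.Int.band value 0x0F = code then 2 * i
  else if PySem.Int.band (value >>> 4) 0x0F = code then 2 * i + 1
  else 8

def remove_inventory_item_py_alt (slots : Int × Int × Int × Int) (item_code : Int) : (Int × Int × Int × Int) × Bool :=
  let out := [slots.1, slots.2.1, slots.2.2.1, slots.2.2.2].map (fun v => PySem.Int.band v 0xFF)
  let code := PySem.Int.band item_code 0x0F
  -- min over the 4 generated positions; Python's min folds left
  let p := min (min (min (pvBPos out code 0) (pvBPos out code 1)) (pvBPos out code 2)) (pvBPos out code 3)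
  let out' := if p < 8 then
      out.set (p / 2) (PySem.Int.band (out.getD (p / 2) 0) (if p % 2 = 0 then 0xF0 else 0x0F))
    else out
  ((out'.getD 0 0, out'.getD 1 0, out'.getD 2 0, out'.getD 3 0), decide (p < 8))

-- ===== PRECONDITION & SPEC =====
def Spec_remove_inventory_item_py (slots : Int × Int × Int × Int) (item_code : Int) (out : (Int × Int × Int × Int) × Bool) : Prop := out = remove_inventory_item_py_alt slots item_code
instance (slots : Int × Int × Int × Int) (item_code : Int) (out : (Int × Int × Int × Int) × Bool) : Decidable (Spec_remove_inventory_item_py slots item_code out) := by unfold Spec_remove_inventory_item_py; infer_instance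

-- ===== CLAIM =====
def Claim_equal_remove_inventory_item_py : Prop := ∀ (slots : Int × Int × Int × Int) (item_code : Int), Dom_remove_inventory_item_py slots item_code → Spec_remove_inventory_item_py slots item_code (remove_inventory_item_py slots item_code)

-- ===== LEMMAS AND PROOFS =====
-- every first-match position of slot i is at least 2*i (its nibbles sit at 2*i and 2*i+1; the
-- sentinel 8 is ≥ 2*i for i ≤ 4)
theorem pvBPos_lb (out : List Int) (code : Int) (i : Nat) (h : i ≤ 4) : 2 * i ≤ pvBPos out code i := by
  unfold pvBPos
  dsimp only
  split_ifs <;> omega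

-- ===== VERDICT =====
set_option maxHeartbeats 1000000 in
theorem remove_inventory_item_py_spec : Claim_equal_remove_inventory_item_py := by
  intro ⟨a, b, c, d⟩ ic _
  unfold Spec_remove_inventory_item_py remove_inventory_item_py remove_inventory_item_py_alt
  dsimp only
  simp only [List.map]
  by_cases l0 : PySem.Int.band (PySem.Int.band a 255) 15 = (PySem.Int.band ic 15)
  · have e0 : pvBPos [(PySem.Int.band a 255), (PySem.Int.band b 255), (PySem.Int.band c 255), (PySem.Int.band d 255)] (PySem.Int.band ic 15) 0 = 0 := by simp [pvBPos, l0]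
    have lb1 : 2 * 1 ≤ pvBPos [(PySem.Int.band a 255), (PySem.Int.band b 255), (PySem.Int.band c 255), (PySem.Int.band d 255)] (PySem.Int.band ic 15) 1 := pvBPos_lb [(PySem.Int.band a 255), (PySem.Int.band b 255), (PySem.Int.band c 255), (PySem.Int.band d 255)] (PySem.Int.band ic 15) 1 (by norm_num)
    have lb2 : 2 * 2 ≤ pvBPos [(PySem.Int.band a 255), (PySem.Int.band b 255), (PySem.Int.band c 255), (PySem.Int.band d 255)] (PySem.Int.band ic 15) 2 := pvBPos_lb [(PySem.Int.band a 255), (PySem.Int.band b 255), (PySem.Int.band c 255), (PySem.Int.band d 255)] (PySem.Int.band ic 15) 2 (by norm_num)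
    have lb3 : 2 * 3 ≤ pvBPos [(PySem.Int.band a 255), (PySem.Int.band b 255), (PySem.Int.band c 255), (PySem.Int.band d 255)] (PySem.Int.band ic 15) 3 := pvBPos_lb [(PySem.Int.band a 255), (PySem.Int.band b 255), (PySem.Int.band c 255), (PySem.Int.band d 255)] (PySem.Int.band ic 15) 3 (by norm_num)
    have hp : (min (min (min (pvBPos [(PySem.Int.band a 255), (PySem.Int.band b 255), (PySem.Int.band c 255), (PySem.Int.band d 255)] (PySem.Int.band ic 15) 0) (pvBPos [(PySem.Int.band a 255), (PySem.Int.band b 255), (PySem.Int.band c 255), (PySem.Int.band d 255)] (PySem.Int.band ic 15) 1)) (pvBPos [(PySem.Int.band a 255), (PySem.Int.band b 255), (PySem.Int.band c 255), (PySem.Int.band d 255)] (PySem.Int.band ic 15) 2)) (pvBPos [(PySem.Int.band a 255), (PySem.Int.band b 255), (PySem.Int.band c 255), (PySem.Int.band d 255)] (PySem.Int.band ic 15) 3)) = 0 := by rw [e0]; omega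
    simp only [hp]
    simp [pvALoop, l0]
  · by_cases h0 : PySem.Int.band ((PySem.Int.band a 255) >>> 4) 15 = (PySem.Int.band ic 15)
    · have e0 : pvBPos [(PySem.Int.band a 255), (PySem.Int.band b 255), (PySem.Int.band c 255), (PySem.Int.band d 255)] (PySem.Int.band ic 15) 0 = 1 := by simp [pvBPos, l0, h0]
      have lb1 : 2 * 1 ≤ pvBPos [(PySem.Int.band a 255), (PySem.Int.band b 255), (PySem.Int.band c 255), (PySem.Int.band d 255)] (PySem.Int.band ic 15) 1 := pvBPos_lb [(PySem.Int.band a 255), (PySem.Int.band b 255), (PySem.Int.band c 255), (PySem.Int.band d 255)] (PySem.Int.band ic 15) 1 (by norm_num)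
      have lb2 : 2 * 2 ≤ pvBPos [(PySem.Int.band a 255), (PySem.Int.band b 255), (PySem.Int.band c 255), (PySem.Int.band d 255)] (PySem.Int.band ic 15) 2 := pvBPos_lb [(PySem.Int.band a 255), (PySem.Int.band b 255), (PySem.Int.band c 255), (PySem.Int.band d 255)] (PySem.Int.band ic 15) 2 (by norm_num)
      have lb3 : 2 * 3 ≤ pvBPos [(PySem.Int.band a 255), (PySem.Int.band b 255), (PySem.Int.band c 255), (PySem.Int.band d 255)] (PySem.Int.band ic 15) 3 := pvBPos_lb [(PySem.Int.band a 255), (PySem.Int.band b 255), (PySem.Int.band c 255), (PySem.Int.band d 255)] (PySem.Int.band ic 15) 3 (by norm_num)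
      have hp : (min (min (min (pvBPos [(PySem.Int.band a 255), (PySem.Int.band b 255), (PySem.Int.band c 255), (PySem.Int.band d 255)] (PySem.Int.band ic 15) 0) (pvBPos [(PySem.Int.band a 255), (PySem.Int.band b 255), (PySem.Int.band c 255), (PySem.Int.band d 255)] (PySem.Int.band ic 15) 1)) (pvBPos [(PySem.Int.band a 255), (PySem.Int.band b 255), (PySem.Int.band c 255), (PySem.Int.band d 255)] (PySem.Int.band ic 15) 2)) (pvBPos [(PySem.Int.band a 255), (PySem.Int.band b 255), (PySem.Int.band c 255), (PySem.Int.band d 255)] (PySem.Int.band ic 15) 3)) = 1 := by rw [e0]; omega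
      simp only [hp]
      simp [pvALoop, l0, h0]
    ·
      by_cases l1 : PySem.Int.band (PySem.Int.band b 255) 15 = (PySem.Int.band ic 15)
      · have e0 : pvBPos [(PySem.Int.band a 255), (PySem.Int.band b 255), (PySem.Int.band c 255), (PySem.Int.band d 255)] (PySem.Int.band ic 15) 0 = 8 := by simp [pvBPos, l0, h0]
        have e1 : pvBPos [(PySem.Int.band a 255), (PySem.Int.band b 255), (PySem.Int.band c 255), (PySem.Int.band d 255)] (PySem.Int.band ic 15) 1 = 2 := by simp [pvBPos, l1]
        have lb2 : 2 * 2 ≤ pvBPos [(PySem.Int.band a 255), (PySem.Int.band b 255), (PySem.Int.band c 255), (PySem.Int.band d 255)] (PySem.Int.band ic 15) 2 := pvBPos_lb [(PySem.Int.band a 255), (PySem.Int.band b 255), (PySem.Int.band c 255), (PySem.Int.band d 255)] (PySem.Int.band ic 15) 2 (by norm_num)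
        have lb3 : 2 * 3 ≤ pvBPos [(PySem.Int.band a 255), (PySem.Int.band b 255), (PySem.Int.band c 255), (PySem.Int.band d 255)] (PySem.Int.band ic 15) 3 := pvBPos_lb [(PySem.Int.band a 255), (PySem.Int.band b 255), (PySem.Int.band c 255), (PySem.Int.band d 255)] (PySem.Int.band ic 15) 3 (by norm_num)
        have hp : (min (min (min (pvBPos [(PySem.Int.band a 255), (PySem.Int.band b 255), (PySem.Int.band c 255), (PySem.Int.band d 255)] (PySem.Int.band ic 15) 0) (pvBPos [(PySem.Int.band a 255), (PySem.Int.band b 255), (PySem.Int.band c 255), (PySem.Int.band d 255)] (PySem.Int.band ic 15) 1)) (pvBPos [(PySem.Int.band a 255), (PySem.Int.band b 255), (PySem.Int.band c 255), (PySem.Int.band d 255)] (PySem.Int.band ic 15) 2)) (pvBPos [(PySem.Int.band a 255), (PySem.Int.band b 255), (PySem.Int.band c 255), (PySem.Int.band d 255)] (PySem.Int.band ic 15) 3)) = 2 := by rw [e0, e1]; omega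
        simp only [hp]
        simp [pvALoop, l0, h0, l1]
      · by_cases h1 : PySem.Int.band ((PySem.Int.band b 255) >>> 4) 15 = (PySem.Int.band ic 15)
        · have e0 : pvBPos [(PySem.Int.band a 255), (PySem.Int.band b 255), (PySem.Int.band c 255), (PySem.Int.band d 255)] (PySem.Int.band ic 15) 0 = 8 := by simp [pvBPos, l0, h0]
          have e1 : pvBPos [(PySem.Int.band a 255), (PySem.Int.band b 255), (PySem.Int.band c 255), (PySem.Int.band d 255)] (PySem.Int.band ic 15) 1 = 3 := by simp [pvBPos, l1, h1]
          have lb2 : 2 * 2 ≤ pvBPos [(PySem.Int.band a 255), (PySem.Int.band b 255), (PySem.Int.band c 255), (PySem.Int.band d 255)] (PySem.Int.band ic 15) 2 := pvBPos_lb [(PySem.Int.band a 255), (PySem.Int.band b 255), (PySem.Int.band c 255), (PySem.Int.band d 255)] (PySem.Int.band ic 15) 2 (by norm_num)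
          have lb3 : 2 * 3 ≤ pvBPos [(PySem.Int.band a 255), (PySem.Int.band b 255), (PySem.Int.band c 255), (PySem.Int.band d 255)] (PySem.Int.band ic 15) 3 := pvBPos_lb [(PySem.Int.band a 255), (PySem.Int.band b 255), (PySem.Int.band c 255), (PySem.Int.band d 255)] (PySem.Int.band ic 15) 3 (by norm_num)
          have hp : (min (min (min (pvBPos [(PySem.Int.band a 255), (PySem.Int.band b 255), (PySem.Int.band c 255), (PySem.Int.band d 255)] (PySem.Int.band ic 15) 0) (pvBPos [(PySem.Int.band a 255), (PySem.Int.band b 255), (PySem.Int.band c 255), (PySem.Int.band d 255)] (PySem.Int.band ic 15) 1)) (pvBPos [(PySem.Int.band a 255), (PySem.Int.band b 255), (PySem.Int.band c 255), (PySem.Int.band d 255)] (PySem.Int.band ic 15) 2)) (pvBPos [(PySem.Int.band a 255), (PySem.Int.band b 255), (PySem.Int.band c 255), (PySem.Int.band d 255)] (PySem.Int.band ic 15) 3)) = 3 := by rw [e0, e1]; omega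
          simp only [hp]
          simp [pvALoop, l0, h0, l1, h1]
        ·
          by_cases l2 : PySem.Int.band (PySem.Int.band c 255) 15 = (PySem.Int.band ic 15)
          · have e0 : pvBPos [(PySem.Int.band a 255), (PySem.Int.band b 255), (PySem.Int.band c 255), (PySem.Int.band d 255)] (PySem.Int.band ic 15) 0 = 8 := by simp [pvBPos, l0, h0]
            have e1 : pvBPos [(PySem.Int.band a 255), (PySem.Int.band b 255), (PySem.Int.band c 255), (PySem.Int.band d 255)] (PySem.Int.band ic 15) 1 = 8 := by simp [pvBPos, l1, h1]
            have e2 : pvBPos [(PySem.Int.band a 255), (PySem.Int.band b 255), (PySem.Int.band c 255), (PySem.Int.band d 255)] (PySem.Int.band ic 15) 2 = 4 := by simp [pvBPos, l2]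
            have lb3 : 2 * 3 ≤ pvBPos [(PySem.Int.band a 255), (PySem.Int.band b 255), (PySem.Int.band c 255), (PySem.Int.band d 255)] (PySem.Int.band ic 15) 3 := pvBPos_lb [(PySem.Int.band a 255), (PySem.Int.band b 255), (PySem.Int.band c 255), (PySem.Int.band d 255)] (PySem.Int.band ic 15) 3 (by norm_num)
            have hp : (min (min (min (pvBPos [(PySem.Int.band a 255), (PySem.Int.band b 255), (PySem.Int.band c 255), (PySem.Int.band d 255)] (PySem.Int.band ic 15) 0) (pvBPos [(PySem.Int.band a 255), (PySem.Int.band b 255), (PySem.Int.band c 255), (PySem.Int.band d 255)] (PySem.Int.band ic 15) 1)) (pvBPos [(PySem.Int.band a 255), (PySem.Int.band b 255), (PySem.Int.band c 255), (PySem.Int.band d 255)] (PySem.Int.band ic 15) 2)) (pvBPos [(PySem.Int.band a 255), (PySem.Int.band b 255), (PySem.Int.band c 255), (PySem.Int.band d 255)] (PySem.Int.band ic 15) 3)) = 4 := by rw [e0, e1, e2]; omega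
            simp only [hp]
            simp [pvALoop, l0, h0, l1, h1, l2]
          · by_cases h2 : PySem.Int.band ((PySem.Int.band c 255) >>> 4) 15 = (PySem.Int.band ic 15)
            · have e0 : pvBPos [(PySem.Int.band a 255), (PySem.Int.band b 255), (PySem.Int.band c 255), (PySem.Int.band d 255)] (PySem.Int.band ic 15) 0 = 8 := by simp [pvBPos, l0, h0]
              have e1 : pvBPos [(PySem.Int.band a 255), (PySem.Int.band b 255), (PySem.Int.band c 255), (PySem.Int.band d 255)] (PySem.Int.band ic 15) 1 = 8 := by simp [pvBPos, l1, h1]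
              have e2 : pvBPos [(PySem.Int.band a 255), (PySem.Int.band b 255), (PySem.Int.band c 255), (PySem.Int.band d 255)] (PySem.Int.band ic 15) 2 = 5 := by simp [pvBPos, l2, h2]
              have lb3 : 2 * 3 ≤ pvBPos [(PySem.Int.band a 255), (PySem.Int.band b 255), (PySem.Int.band c 255), (PySem.Int.band d 255)] (PySem.Int.band ic 15) 3 := pvBPos_lb [(PySem.Int.band a 255), (PySem.Int.band b 255), (PySem.Int.band c 255), (PySem.Int.band d 255)] (PySem.Int.band ic 15) 3 (by norm_num)
              have hp : (min (min (min (pvBPos [(PySem.Int.band a 255), (PySem.Int.band b 255), (PySem.Int.band c 255), (PySem.Int.band d 255)] (PySem.Int.band ic 15) 0) (pvBPos [(PySem.Int.band a 255), (PySem.Int.band b 255), (PySem.Int.band c 255), (PySem.Int.band d 255)] (PySem.Int.band ic 15) 1)) (pvBPos [(PySem.Int.band a 255), (PySem.Int.band b 255), (PySem.Int.band c 255), (PySem.Int.band d 255)] (PySem.Int.band ic 15) 2)) (pvBPos [(PySem.Int.band a 255), (PySem.Int.band b 255), (PySem.Int.band c 255), (PySem.Int.band d 255)] (PySem.Int.band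 ic 15) 3)) = 5 := by rw [e0, e1, e2]; omega
              simp only [hp]
              simp [pvALoop, l0, h0, l1, h1, l2, h2]
            ·
              by_cases l3 : PySem.Int.band (PySem.Int.band d 255) 15 = (PySem.Int.band ic 15)
              · have e0 : pvBPos [(PySem.Int.band a 255), (PySem.Int.band b 255), (PySem.Int.band c 255), (PySem.Int.band d 255)] (PySem.Int.band ic 15) 0 = 8 := by simp [pvBPos, l0, h0]
                have e1 : pvBPos [(PySem.Int.band a 255), (PySem.Int.band b 255), (PySem.Int.band c 255), (PySem.Int.band d 255)] (PySem.Int.band ic 15) 1 = 8 := by simp [pvBPos, l1, h1]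
                have e2 : pvBPos [(PySem.Int.band a 255), (PySem.Int.band b 255), (PySem.Int.band c 255), (PySem.Int.band d 255)] (PySem.Int.band ic 15) 2 = 8 := by simp [pvBPos, l2, h2]
                have e3 : pvBPos [(PySem.Int.band a 255), (PySem.Int.band b 255), (PySem.Int.band c 255), (PySem.Int.band d 255)] (PySem.Int.band ic 15) 3 = 6 := by simp [pvBPos, l3]
                have hp : (min (min (min (pvBPos [(PySem.Int.band a 255), (PySem.Int.band b 255), (PySem.Int.band c 255), (PySem.Int.band d 255)] (PySem.Int.band ic 15) 0) (pvBPos [(PySem.Int.band a 255), (PySem.Int.band b 255), (PySem.Int.band c 255), (PySem.Int.band d 255)] (PySem.Int.band ic 15) 1)) (pvBPos [(PySem.Int.band a 255), (PySem.Int.band b 255), (PySem.Int.band c 255), (PySem.Int.band d 255)] (PySem.Int.band ic 15) 2)) (pvBPos [(PySem.Int.band a 255), (PySem.Int.band b 255), (PySem.Int.band c 255), (PySem.Int.band d 255)] (PySem.Int.band ic 15) 3)) = 6 := by rw [e0, e1, e2, e3]; omega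
                simp only [hp]
                simp [pvALoop, l0, h0, l1, h1, l2, h2, l3]
              · by_cases h3 : PySem.Int.band ((PySem.Int.band d 255) >>> 4) 15 = (PySem.Int.band ic 15)
                · have e0 : pvBPos [(PySem.Int.band a 255), (PySem.Int.band b 255), (PySem.Int.band c 255), (PySem.Int.band d 255)] (PySem.Int.band ic 15) 0 = 8 := by simp [pvBPos, l0, h0]
                  have e1 : pvBPos [(PySem.Int.band a 255), (PySem.Int.band b 255), (PySem.Int.band c 255), (PySem.Int.band d 255)] (PySem.Int.band ic 15) 1 = 8 := by simp [pvBPos, l1, h1]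
                  have e2 : pvBPos [(PySem.Int.band a 255), (PySem.Int.band b 255), (PySem.Int.band c 255), (PySem.Int.band d 255)] (PySem.Int.band ic 15) 2 = 8 := by simp [pvBPos, l2, h2]
                  have e3 : pvBPos [(PySem.Int.band a 255), (PySem.Int.band b 255), (PySem.Int.band c 255), (PySem.Int.band d 255)] (PySem.Int.band ic 15) 3 = 7 := by simp [pvBPos, l3, h3]
                  have hp : (min (min (min (pvBPos [(PySem.Int.band a 255), (PySem.Int.band b 255), (PySem.Int.band c 255), (PySem.Int.band d 255)] (PySem.Int.band ic 15) 0) (pvBPos [(PySem.Int.band a 255), (PySem.Int.band b 255), (PySem.Int.band c 255), (PySem.Int.band d 255)] (PySem.Int.band ic 15) 1)) (pvBPos [(PySem.Int.band a 255), (PySem.Int.band b 255), (PySem.Int.band c 255), (PySem.Int.band d 255)] (PySem.Int.band ic 15) 2)) (pvBPos [(PySem.Int.band a 255), (PySem.Int.band b 255), (PySem.Int.band c 255), (PySem.Int.band d 255)] (PySem.Int.band ic 15) 3)) = 7 := by rw [e0, e1, e2, e3]; omega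
                  simp only [hp]
                  simp [pvALoop, l0, h0, l1, h1, l2, h2, l3, h3]
                ·
                  -- no nibble matches anywhere
                  have e0 : pvBPos [(PySem.Int.band a 255), (PySem.Int.band b 255), (PySem.Int.band c 255), (PySem.Int.band d 255)] (PySem.Int.band ic 15) 0 = 8 := by simp [pvBPos, l0, h0]
                  have e1 : pvBPos [(PySem.Int.band a 255), (PySem.Int.band b 255), (PySem.Int.band c 255), (PySem.Int.band d 255)] (PySem.Int.band ic 15) 1 = 8 := by simp [pvBPos, l1, h1]
                  have e2 : pvBPos [(PySem.Int.band a 255), (PySem.Int.band b 255), (PySem.Int.band c 255), (PySem.Int.band d 255)] (PySem.Int.band ic 15) 2 = 8 := by simp [pvBPos, l2, h2]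
                  have e3 : pvBPos [(PySem.Int.band a 255), (PySem.Int.band b 255), (PySem.Int.band c 255), (PySem.Int.band d 255)] (PySem.Int.band ic 15) 3 = 8 := by simp [pvBPos, l3, h3]
                  have hp : (min (min (min (pvBPos [(PySem.Int.band a 255), (PySem.Int.band b 255), (PySem.Int.band c 255), (PySem.Int.band d 255)] (PySem.Int.band ic 15) 0) (pvBPos [(PySem.Int.band a 255), (PySem.Int.band b 255), (PySem.Int.band c 255), (PySem.Int.band d 255)] (PySem.Int.band ic 15) 1)) (pvBPos [(PySem.Int.band a 255), (PySem.Int.band b 255), (PySem.Int.band c 255), (PySem.Int.band d 255)] (PySem.Int.band ic 15) 2)) (pvBPos [(PySem.Int.band a 255), (PySem.Int.band b 255), (PySem.Int.band c 255), (PySem.Int.band d 255)] (PySem.Int.band ic 15) 3)) = 8 := by rw [e0, e1, e2, e3]; omega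
                  simp only [hp]
                  simp [pvALoop, l0, h0, l1, h1, l2, h2, l3, h3]
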